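-- pv_equiv track=rewrite | github.com/fionahiiwx/CITS1401 | Past Paper 2017 sem1.py | marksdistribution
-- ===== SOURCE A (Python) =====
-- def marksdistribution(D):
--     grades = ["N","P","Cr","D","HD"]
--     grade_count = [0,0,0,0,0]
--     marks = {}
--     for i in D:
--         if D[i] < 50:
--             grade_count[0]+=1
--         elif D[i] < 60:
--             grade_count[1]+=1
--         elif D[i] < 70:
--             grade_count[2]+=1
--         elif D[i] < 80:
--             grade_count[3]+=1
--         else:
--             grade_count[4]+=1
--     for j in range(len(grades)):
--         if grade_count[j] != 0:
--             marks[grades[j]] = grade_count[j]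
--     return marks
-- ===== SOURCE B (Python) =====
-- def marksdistribution(D):
--     vals = list(D.values())
--     # cumulative distribution: how many marks fall below each grade boundary
--     below = [sum(m < t for m in vals) for t in (50, 60, 70, 80)] + [len(vals)]
--     # bucket sizes are consecutive differences of the cumulative counts
--     counts = [hi - lo for lo, hi in zip([0] + below, below)]
--     return {g: c for g, c in zip(["N", "P", "Cr", "D", "HD"], counts) if c}
-- ===== Notes on version B (the rewrite author's own statement) =====
-- stated objective: alternative
-- what changed: Instead of classifying each mark with the chained <50/<60/<70/<80 comparisons into a 5-slot count array and then filtering nonzero slots, B computes the cumulative distribution (number of marks below each boundary, one threshold-counting pass per boundary) and obtains each bucket as the difference of consecutive cumulative counts, emitting the nonzero ones with one comprehension.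
import Mathlib
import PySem

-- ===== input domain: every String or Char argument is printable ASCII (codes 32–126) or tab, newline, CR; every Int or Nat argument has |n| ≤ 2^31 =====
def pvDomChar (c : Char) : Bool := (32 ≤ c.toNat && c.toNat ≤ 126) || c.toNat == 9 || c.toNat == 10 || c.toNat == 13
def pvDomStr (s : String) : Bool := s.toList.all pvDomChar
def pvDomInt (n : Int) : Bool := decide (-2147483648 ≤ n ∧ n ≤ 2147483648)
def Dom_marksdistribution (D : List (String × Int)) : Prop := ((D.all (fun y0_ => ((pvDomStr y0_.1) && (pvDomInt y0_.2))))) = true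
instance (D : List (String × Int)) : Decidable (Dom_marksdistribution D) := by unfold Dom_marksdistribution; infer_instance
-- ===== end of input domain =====

-- B replaces A's per-mark chained classification into a 5-slot count array (plus a
-- nonzero-filtering index loop) with cumulative threshold counts whose consecutive
-- differences are the bucket sizes (objective: alternative).

-- ===== PORT A =====
-- 'for i in D' iterates the dict's keys; 'D[i]' is the lookup (the key is always present,
-- so getD's default 0 is never used).
def marksdistribution (D : List (String × Int)) : List (String × Int) :=
  let grades : List String := ["N", "P", "Cr", "D", "HD"]
  let grade_count : List Int :=
    (D.map Prod.fst).foldl (fun gc i =>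
      let v := (PySem.Dict.mk D).getD i 0
      if v < 50 then gc.set 0 (gc.getD 0 0 + 1)
      else if v < 60 then gc.set 1 (gc.getD 1 0 + 1)
      else if v < 70 then gc.set 2 (gc.getD 2 0 + 1)
      else if v < 80 then gc.set 3 (gc.getD 3 0 + 1)
      else gc.set 4 (gc.getD 4 0 + 1)) [0, 0, 0, 0, 0]
  let marks : PySem.Dict String Int :=
    (List.range grades.length).foldl (fun marks j =>
      if grade_count.getD j 0 ≠ 0 then marks.insert (grades.getD j "") (grade_count.getD j 0)
      else marks) PySem.Dict.empty
  marks.items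

-- ===== PORT B =====
-- 'sum(m < t for m in vals)' is the count of elements below t (ported as countP);
-- the dict comprehension is a fold inserting in grade order.
def marksdistribution_alt (D : List (String × Int)) : List (String × Int) :=
  let vals : List Int := D.map Prod.snd
  let below : List Int :=
    (([50, 60, 70, 80] : List Int).map (fun t => ((vals.countP (fun m => m < t) : Nat) : Int)))
      ++ [((vals.length : Nat) : Int)]
  let counts : List Int := ((0 :: below).zip below).map (fun lh => lh.2 - lh.1)
  (((["N", "P", "Cr", "D", "HD"] : List String).zip counts).foldl
      (fun (d : PySem.Dict String Int) gc => if gc.2 ≠ 0 then d.insert gc.1 gc.2 else d)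
      PySem.Dict.empty).items

-- ===== PRECONDITION & SPEC =====
-- Pre_ excludes association lists with duplicate keys: those do not represent a Python dict
-- (dict keys are unique; Python collapses duplicates before the function ever runs).
def Pre_marksdistribution (D : List (String × Int)) : Prop := (D.map Prod.fst).Nodup
instance (D : List (String × Int)) : Decidable (Pre_marksdistribution D) := by unfold Pre_marksdistribution; infer_instance
def pvWitness_marksdistribution : (List (String × Int)) := [("ann", 45), ("bob", 70), ("cy", 95)]
def Spec_marksdistribution (D : List (String × Int)) (out : List (String × Int)) : Prop := out = marksdistribution_alt D
instance (D : List (String × Int)) (out : List (String × Int)) : Decidable (Spec_marksdistribution D out) := by unfold Spec_marksdistribution; infer_instance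

-- ===== CLAIM (what is proved, stated in full; the proofs are below) =====
def Claim_equal_marksdistribution : Prop := ∀ (D : List (String × Int)), Dom_marksdistribution D → Pre_marksdistribution D → Spec_marksdistribution D (marksdistribution D)

-- ===== LEMMAS AND PROOFS =====

-- the five grade buckets as predicates on the mark
def pvB0 (v : Int) : Bool := v < 50
def pvB1 (v : Int) : Bool := !(v < 50) && v < 60
def pvB2 (v : Int) : Bool := !(v < 60) && v < 70
def pvB3 (v : Int) : Bool := !(v < 70) && v < 80
def pvB4 (v : Int) : Bool := !(v < 80)

-- the common normal form of both results, as a function of the five bucket counts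
def pvOut (c0 c1 c2 c3 c4 : Int) : List (String × Int) :=
  (if c0 ≠ 0 then [("N", c0)] else []) ++ (if c1 ≠ 0 then [("P", c1)] else []) ++
  (if c2 ≠ 0 then [("Cr", c2)] else []) ++ (if c3 ≠ 0 then [("D", c3)] else []) ++
  (if c4 ≠ 0 then [("HD", c4)] else [])

lemma loopA (l : List (String × Int)) (a b c d e : Int) :
    l.foldl (fun gc p =>
      if p.2 < 50 then gc.set 0 (gc.getD 0 0 + 1)
      else if p.2 < 60 then gc.set 1 (gc.getD 1 0 + 1)
      else if p.2 < 70 then gc.set 2 (gc.getD 2 0 + 1)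
      else if p.2 < 80 then gc.set 3 (gc.getD 3 0 + 1)
      else gc.set 4 (gc.getD 4 0 + 1)) [a, b, c, d, e]
    = [a + (l.countP (fun p => pvB0 p.2) : Int), b + (l.countP (fun p => pvB1 p.2) : Int),
       c + (l.countP (fun p => pvB2 p.2) : Int), d + (l.countP (fun p => pvB3 p.2) : Int),
       e + (l.countP (fun p => pvB4 p.2) : Int)] := by
  induction l generalizing a b c d e with
  | nil => simp
  | cons x t ih =>
    simp only [List.foldl_cons]
    have s0 : ([a, b, c, d, e] : List Int).set 0 (([a, b, c, d, e] : List Int).getD 0 0 + 1) = [a + 1, b, c, d, e] := rfl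
    have s1 : ([a, b, c, d, e] : List Int).set 1 (([a, b, c, d, e] : List Int).getD 1 0 + 1) = [a, b + 1, c, d, e] := rfl
    have s2 : ([a, b, c, d, e] : List Int).set 2 (([a, b, c, d, e] : List Int).getD 2 0 + 1) = [a, b, c + 1, d, e] := rfl
    have s3 : ([a, b, c, d, e] : List Int).set 3 (([a, b, c, d, e] : List Int).getD 3 0 + 1) = [a, b, c, d + 1, e] := rfl
    have s4 : ([a, b, c, d, e] : List Int).set 4 (([a, b, c, d, e] : List Int).getD 4 0 + 1) = [a, b, c, d, e + 1] := rfl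
    split_ifs with h0 h1 h2 h3
    · rw [s0, ih]; simp [List.countP_cons, pvB0, pvB1, pvB2, pvB3, pvB4, h0]; omega
    · rw [s1, ih]; simp [List.countP_cons, pvB0, pvB1, pvB2, pvB3, pvB4, h0, h1]; omega
    · rw [s2, ih]; simp [List.countP_cons, pvB0, pvB1, pvB2, pvB3, pvB4, h0, h1, h2]; omega
    · rw [s3, ih]; simp [pvB0, pvB1, pvB2, pvB3, pvB4, h0, h1, h2, h3]; omega
    · rw [s4, ih]; simp [pvB0, pvB1, pvB2, pvB3, pvB4, h0, h1, h2, h3]; omega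

lemma outA (c0 c1 c2 c3 c4 : Int) :
    ((List.range (["N", "P", "Cr", "D", "HD"] : List String).length).foldl (fun (marks : PySem.Dict String Int) j =>
      if ([c0, c1, c2, c3, c4] : List Int).getD j 0 ≠ 0 then
        marks.insert ((["N", "P", "Cr", "D", "HD"] : List String).getD j "") (([c0, c1, c2, c3, c4] : List Int).getD j 0)
      else marks) PySem.Dict.empty).items = pvOut c0 c1 c2 c3 c4 := by
  have h5 : (List.range (["N", "P", "Cr", "D", "HD"] : List String).length) = [0, 1, 2, 3, 4] := by decide
  rw [h5]
  have g0 : ([c0, c1, c2, c3, c4] : List Int).getD 0 0 = c0 := rfl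
  have g1 : ([c0, c1, c2, c3, c4] : List Int).getD 1 0 = c1 := rfl
  have g2 : ([c0, c1, c2, c3, c4] : List Int).getD 2 0 = c2 := rfl
  have g3 : ([c0, c1, c2, c3, c4] : List Int).getD 3 0 = c3 := rfl
  have g4 : ([c0, c1, c2, c3, c4] : List Int).getD 4 0 = c4 := rfl
  simp only [List.foldl_cons, List.foldl_nil, g0, g1, g2, g3, g4, pvOut]
  split_ifs <;> simp [PySem.Dict.items_insert, PySem.Dict.contains_insert, PySem.Dict.empty]

lemma outB (c0 c1 c2 c3 c4 : Int) :
    (([("N", c0), ("P", c1), ("Cr", c2), ("D", c3), ("HD", c4)] : List (String × Int)).foldl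
      (fun (d : PySem.Dict String Int) gc => if gc.2 ≠ 0 then d.insert gc.1 gc.2 else d)
      PySem.Dict.empty).items = pvOut c0 c1 c2 c3 c4 := by
  simp only [List.foldl_cons, List.foldl_nil, pvOut]
  split_ifs <;> simp [PySem.Dict.items_insert, PySem.Dict.contains_insert, PySem.Dict.empty]

-- cumulative counts split into the bucket counts
lemma split50 (l : List Int) : l.countP (fun m => m < 50) = l.countP pvB0 := rfl
lemma split60 (l : List Int) : l.countP (fun m => m < 60) = l.countP pvB0 + l.countP pvB1 := by
  induction l with
  | nil => simp
  | cons x t ih =>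
    simp only [List.countP_cons, pvB0, pvB1] at *
    by_cases h1 : x < 50 <;> by_cases h2 : x < 60 <;> simp [h1, h2, ih] <;> omega
lemma split70 (l : List Int) : l.countP (fun m => m < 70) = l.countP pvB0 + l.countP pvB1 + l.countP pvB2 := by
  induction l with
  | nil => simp
  | cons x t ih =>
    simp only [List.countP_cons, pvB0, pvB1, pvB2] at *
    by_cases h1 : x < 50 <;> by_cases h2 : x < 60 <;> by_cases h3 : x < 70 <;> simp [h1, h2, h3, ih] <;> omega
lemma split80 (l : List Int) : l.countP (fun m => m < 80) = l.countP pvB0 + l.countP pvB1 + l.countP pvB2 + l.countP pvB3 := by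
  induction l with
  | nil => simp
  | cons x t ih =>
    simp only [List.countP_cons, pvB0, pvB1, pvB2, pvB3] at *
    by_cases h1 : x < 50 <;> by_cases h2 : x < 60 <;> by_cases h3 : x < 70 <;> by_cases h4 : x < 80 <;>
      simp [h1, h2, h3, h4, ih] <;> omega
lemma splitLen (l : List Int) : l.length = l.countP pvB0 + l.countP pvB1 + l.countP pvB2 + l.countP pvB3 + l.countP pvB4 := by
  induction l with
  | nil => simp
  | cons x t ih =>
    simp only [List.countP_cons, List.length_cons, pvB0, pvB1, pvB2, pvB3, pvB4] at *
    by_cases h1 : x < 50 <;> by_cases h2 : x < 60 <;> by_cases h3 : x < 70 <;> by_cases h4 : x < 80 <;>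
      simp [h1, h2, h3, h4, ih] <;> omega

-- ===== VERDICT (by name: the statement is the Claim_ definition above) =====
set_option maxHeartbeats 1000000 in
theorem marksdistribution_spec : Claim_equal_marksdistribution := by
  intro D _ hpre
  show marksdistribution D = marksdistribution_alt D
  unfold marksdistribution marksdistribution_alt
  simp only [List.foldl_map]
  -- A's dict lookup returns the pair's own value (keys are unique under Pre_)
  have hlook : ∀ (gc : List Int) (p : String × Int), p ∈ D →
      (fun (gc : List Int) (p : String × Int) =>
        if (PySem.Dict.mk D).getD p.1 0 < 50 then gc.set 0 (gc.getD 0 0 + 1)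
        else if (PySem.Dict.mk D).getD p.1 0 < 60 then gc.set 1 (gc.getD 1 0 + 1)
        else if (PySem.Dict.mk D).getD p.1 0 < 70 then gc.set 2 (gc.getD 2 0 + 1)
        else if (PySem.Dict.mk D).getD p.1 0 < 80 then gc.set 3 (gc.getD 3 0 + 1)
        else gc.set 4 (gc.getD 4 0 + 1)) gc p
      = (fun (gc : List Int) (p : String × Int) =>
        if p.2 < 50 then gc.set 0 (gc.getD 0 0 + 1)
        else if p.2 < 60 then gc.set 1 (gc.getD 1 0 + 1)
        else if p.2 < 70 then gc.set 2 (gc.getD 2 0 + 1)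
        else if p.2 < 80 then gc.set 3 (gc.getD 3 0 + 1)
        else gc.set 4 (gc.getD 4 0 + 1)) gc p := by
    intro gc p hp
    have h : (PySem.Dict.mk D).getD p.1 0 = p.2 :=
      PySem.Dict.getD_of_mem_items (d := PySem.Dict.mk D) (k := p.1) (v := p.2) hp hpre 0
    simp only [h]
  have hA := PySem.List.foldl_congr_mem (init := ([0,0,0,0,0] : List Int)) (h := hlook)
  rw [loopA] at hA
  simp only [hA, zero_add]
  -- reduce B's zip/map plumbing to the explicit five-entry list
  simp only [List.cons_append, List.nil_append, List.zip, List.zipWith, List.map_cons, List.map_nil]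
  rw [outA, outB]
  -- cumulative counts over vals = D.map Prod.snd, split into bucket counts over D
  have m0 : (D.map Prod.snd).countP pvB0 = D.countP (fun p => pvB0 p.2) := by
    rw [List.countP_map]; rfl
  have m1 : (D.map Prod.snd).countP pvB1 = D.countP (fun p => pvB1 p.2) := by
    rw [List.countP_map]; rfl
  have m2 : (D.map Prod.snd).countP pvB2 = D.countP (fun p => pvB2 p.2) := by
    rw [List.countP_map]; rfl
  have m3 : (D.map Prod.snd).countP pvB3 = D.countP (fun p => pvB3 p.2) := by
    rw [List.countP_map]; rfl
  have m4 : (D.map Prod.snd).countP pvB4 = D.countP (fun p => pvB4 p.2) := by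
    rw [List.countP_map]; rfl
  rw [split50, split60, split70, split80, splitLen, m0, m1, m2, m3, m4]
  congr 1 <;> push_cast <;> ring
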